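-- pv_equiv track=rewrite | github.com/stellurion/acm | codeforces/codeforces 918/language.py | backtrack
-- ===== SOURCE A (Python) =====
-- import copy
--
-- def backtrack(word, fullword, extra): #full word
--     if word == "":
--         for f in fullword:
--             extra.append(f)
--         return fullword
--     if len(word) >= 2:
--         if validcv(word[0:2]):
--             fullwordcopy = copy.deepcopy(fullword)
--             fullwordcopy.append(word[0:2])
--             if backtrack(word[2:], fullwordcopy, extra) != None: #not saving the pathing correctly
--                 return fullword
--     if len(word) >= 3:
--         if validcv(word[0:3]):
--             fullwordcopy = copy.deepcopy(fullword)
--             fullwordcopy.append(word[0:3])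
--             if backtrack(word[3:], fullwordcopy, extra) != None:
--                 return fullword
--
-- def validcv(word):
--     flag = True
--
--     if word[0] != "b" and word[0] != "c" and word[0] != "d":
--         flag = False
--     if word[1] != "a" and word[1] != "e":
--         flag = False
--
--     return flag
-- ===== SOURCE B (Python) =====
-- def backtrack(word, fullword, extra):
--     # DP over start indices instead of exponential DFS with deepcopies; same
--     # return value and the same in-place append to `extra` on success.
--     n = len(word)
--     def ok(i):
--         return word[i] in "bcd" and word[i + 1] in "ae"
--     reach = [False] * (n + 1)
--     reach[n] = True
--     for i in range(n - 1, -1, -1):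
--         reach[i] = i + 2 <= n and ok(i) and (reach[i + 2] or (i + 3 <= n and reach[i + 3]))
--     if not reach[0]:
--         return None
--     parts = []
--     i = 0
--     while i < n:
--         step = 2 if reach[i + 2] else 3
--         parts.append(word[i:i + step])
--         i += step
--     extra.extend(fullword)
--     extra.extend(parts)
--     return fullword
-- ===== Notes on version B (the rewrite author's own statement) =====
-- stated objective: faster
-- what changed: A's exponential backtracking DFS with deepcopies of the accumulator is replaced by an O(n) backwards reachability DP over start indices plus a greedy 2-before-3 reconstruction for the same in-place append to extra.
import Mathlib
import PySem

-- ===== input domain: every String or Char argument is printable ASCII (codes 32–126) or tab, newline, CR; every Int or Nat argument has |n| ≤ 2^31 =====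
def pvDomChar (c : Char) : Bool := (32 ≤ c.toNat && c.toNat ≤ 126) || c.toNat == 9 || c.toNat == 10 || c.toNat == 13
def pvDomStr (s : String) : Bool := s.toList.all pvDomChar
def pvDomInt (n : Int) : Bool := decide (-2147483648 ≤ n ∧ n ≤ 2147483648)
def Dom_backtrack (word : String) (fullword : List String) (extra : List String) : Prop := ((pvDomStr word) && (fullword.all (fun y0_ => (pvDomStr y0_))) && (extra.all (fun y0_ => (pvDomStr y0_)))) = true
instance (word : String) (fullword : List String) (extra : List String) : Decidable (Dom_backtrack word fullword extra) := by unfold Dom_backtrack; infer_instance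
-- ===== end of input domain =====

-- B replaces A's exponential deepcopy-DFS by an O(n) reachability DP; A mutates
-- `extra` in place on success and B performs the same mutation in Python, the
-- theorems here are about the return value only.

-- ===== PORT A =====
-- validcv: checks only the first two characters; call sites always pass length ≥ 2,
-- so the getD defaults are never read (Python would raise IndexError on shorter input).
def validcv (w : List Char) : Bool :=
  let flag := true
  let flag := if !(w.getD 0 ' ' == 'b') && !(w.getD 0 ' ' == 'c') && !(w.getD 0 ' ' == 'd') then false else flag
  let flag := if !(w.getD 1 ' ' == 'a') && !(w.getD 1 ' ' == 'e') then false else flag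
  flag

-- word[0:2]/word[2:] (resp. 0:3/3:) are materialised by the pattern match, exact
-- because the length guards len(word)>=2 / >=3 are exactly the match shapes.
-- `extra` is threaded but (being a pure port) cannot carry A's in-place append.
def backtrackAux : List Char → List String → List String → Option (List String)
  | [], f, _ => some f
  | [_], _, _ => none
  | [a, b], f, e =>
    if validcv [a, b] && (backtrackAux [] (f ++ [String.ofList [a, b]]) e).isSome then some f
    else none
  | a :: b :: c :: rest2, f, e =>
    if validcv [a, b] && (backtrackAux (c :: rest2) (f ++ [String.ofList [a, b]]) e).isSome then
      some f
    else if validcv [a, b, c] && (backtrackAux rest2 (f ++ [String.ofList [a, b, c]]) e).isSome then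
      some f
    else none

def backtrack (word : String) (fullword : List String) (extra : List String) : Option (List String) :=
  backtrackAux word.toList fullword extra

-- ===== PORT B =====
-- pvReach w = Source B's `reach` array for the suffixes of w (head = reach[i] for the
-- current start index i, last = reach[n] = true); built back-to-front like Source B's
-- downward loop.  getD … false is exact for the bounds tests i+2<=n / i+3<=n.
def pvReach : List Char → List Bool
  | [] => [true]
  | c :: rest =>
    let rs := pvReach rest
    let ok := match rest with
      | b :: _ => (c == 'b' || c == 'c' || c == 'd') && (b == 'a' || b == 'e')
      | [] => false
    (ok && (rs.getD 1 false || rs.getD 2 false)) :: rs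

-- Source B's parts-reconstruction loop only feeds the in-place append to `extra`
-- (a side effect outside the return value), so it has no counterpart here.
def backtrack_alt (word : String) (fullword : List String) (extra : List String) : Option (List String) :=
  if (pvReach word.toList).getD 0 false then some fullword else none

-- ===== PRECONDITION & SPEC =====
def Spec_backtrack (word : String) (fullword : List String) (extra : List String) (out : Option (List String)) : Prop := out = backtrack_alt word fullword extra
instance (word : String) (fullword : List String) (extra : List String) (out : Option (List String)) : Decidable (Spec_backtrack word fullword extra out) := by unfold Spec_backtrack; infer_instance

-- ===== CLAIM (what is proved, stated in full; the proofs are below) =====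
def Claim_equal_backtrack : Prop := ∀ (word : String) (fullword : List String) (extra : List String), Dom_backtrack word fullword extra → Spec_backtrack word fullword extra (backtrack word fullword extra)

-- ===== LEMMAS AND PROOFS =====

theorem validcv_three (a b c : Char) : validcv [a, b, c] = validcv [a, b] := by
  simp [validcv]

theorem validcv_eq (a b : Char) :
    validcv [a, b] = ((a == 'b' || a == 'c' || a == 'd') && (b == 'a' || b == 'e')) := by
  cases h1 : a == 'b' <;> cases h2 : a == 'c' <;> cases h3 : a == 'd' <;>
    cases h4 : b == 'a' <;> cases h5 : b == 'e' <;> simp [validcv, h1, h2, h3, h4, h5]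

theorem backtrackAux_eq : ∀ (w : List Char) (f e : List String),
    backtrackAux w f e = if (pvReach w).getD 0 false then some f else none
  | [], f, e => by simp [backtrackAux, pvReach]
  | [a], f, e => by simp [backtrackAux, pvReach]
  | [a, b], f, e => by
    rw [backtrackAux, validcv_eq]
    cases h : (a == 'b' || a == 'c' || a == 'd') && (b == 'a' || b == 'e') <;>
      simp [backtrackAux, pvReach, h]
  | a :: b :: c :: rest2, f, e => by
    rw [backtrackAux, backtrackAux_eq (c :: rest2), backtrackAux_eq rest2,
      validcv_three, validcv_eq]
    cases hv : (a == 'b' || a == 'c' || a == 'd') && (b == 'a' || b == 'e') <;>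
      cases hc : (pvReach (c :: rest2)).getD 0 false <;>
      cases h2 : (pvReach rest2).getD 0 false <;>
      simp_all [pvReach]

-- ===== VERDICT (by name: the statement is the Claim_ definition above) =====
theorem backtrack_spec : Claim_equal_backtrack := by
  intro word fullword extra _
  unfold Spec_backtrack backtrack backtrack_alt
  exact backtrackAux_eq word.toList fullword extra
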